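-- pv_equiv track=rewrite | github.com/rosebudtse/Drive-VLM-BDD100k | stage3/extract_keyword.py | categorize_nouns
-- ===== SOURCE A (Python) =====
-- from typing import Dict, List, Tuple
--
-- def categorize_nouns(nouns: List[str]) -> Dict[str, List[str]]:
--     """Categorize nouns into driving scene categories.
--
--     Returns:
--         Dictionary mapping categories to word lists
--     """
--     # Predefined category keywords
--     category_keywords = {
--         'vehicles': ['car', 'vehicle', 'truck', 'bus', 'suv', 'sedan', 'motorcycle', 'bicycle'],
--         'traffic_control': ['light', 'signal', 'sign', 'traffic', 'stop', 'yield'],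
--         'pedestrians': ['person', 'pedestrian', 'people', 'cyclist', 'walker'],
--         'road_elements': ['road', 'street', 'lane', 'intersection', 'crosswalk', 'sidewalk', 'highway', 'curb'],
--         'landmarks': ['building', 'store', 'shop', 'fence', 'house', 'structure', 'storefront'],
--         'environment': ['tree', 'sky', 'cloud', 'weather', 'rain', 'fog'],
--         'lighting': ['light', 'lamp', 'illumination', 'glow', 'headlight', 'streetlight']
--     }
--
--     categorized = {cat: [] for cat in category_keywords.keys()}
--     uncategorized = []
--
--     for noun in nouns:
--         assigned = False
--         for category, keywords in category_keywords.items():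
--             if any(kw in noun for kw in keywords):
--                 categorized[category].append(noun)
--                 assigned = True
--                 break
--
--         if not assigned:
--             uncategorized.append(noun)
--
--     # Keep top 20 uncategorized words
--     categorized['other'] = uncategorized[:20]
--
--     return categorized
-- ===== SOURCE B (Python) =====
-- from typing import Dict, List, Optional
--
-- CATEGORY_KEYWORDS = {
--     'vehicles': ['car', 'vehicle', 'truck', 'bus', 'suv', 'sedan', 'motorcycle', 'bicycle'],
--     'traffic_control': ['light', 'signal', 'sign', 'traffic', 'stop', 'yield'],
--     'pedestrians': ['person', 'pedestrian', 'people', 'cyclist', 'walker'],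
--     'road_elements': ['road', 'street', 'lane', 'intersection', 'crosswalk', 'sidewalk', 'highway', 'curb'],
--     'landmarks': ['building', 'store', 'shop', 'fence', 'house', 'structure', 'storefront'],
--     'environment': ['tree', 'sky', 'cloud', 'weather', 'rain', 'fog'],
--     'lighting': ['light', 'lamp', 'illumination', 'glow', 'headlight', 'streetlight']
-- }
--
--
-- def first_category(noun: str) -> Optional[str]:
--     """First category (in table order) one of whose keywords is a substring of noun."""
--     for category, keywords in CATEGORY_KEYWORDS.items():
--         if any(kw in noun for kw in keywords):
--             return category
--     return None
--
--
-- def categorize_nouns(nouns: List[str]) -> Dict[str, List[str]]: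
--     """Categorize nouns into driving scene categories (label once, then one filter per category)."""
--     pairs = [(n, first_category(n)) for n in nouns]
--     result = {cat: [n for n, c in pairs if c == cat] for cat in CATEGORY_KEYWORDS}
--     result['other'] = [n for n, c in pairs if c is None][:20]
--     return result
-- ===== Notes on version B (the rewrite author's own statement) =====
-- stated objective: simpler
-- what changed: B replaces A's single mutating pass (inner break-loop appending into a dict, with an assigned flag) by a pure decomposition: a first_category helper labels each noun once, then the dict is built in one comprehension with one filter per category plus one for 'other', with no mutation or flag.
import Mathlib
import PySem

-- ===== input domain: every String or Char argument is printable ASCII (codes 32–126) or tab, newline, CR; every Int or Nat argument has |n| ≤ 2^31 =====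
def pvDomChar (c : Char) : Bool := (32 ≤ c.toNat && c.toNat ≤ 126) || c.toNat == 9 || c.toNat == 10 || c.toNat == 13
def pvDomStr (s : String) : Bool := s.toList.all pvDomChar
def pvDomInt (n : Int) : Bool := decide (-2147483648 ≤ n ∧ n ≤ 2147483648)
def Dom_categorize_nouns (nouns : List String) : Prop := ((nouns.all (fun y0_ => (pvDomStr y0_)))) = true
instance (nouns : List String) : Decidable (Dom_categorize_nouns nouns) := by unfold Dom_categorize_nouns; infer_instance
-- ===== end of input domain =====

-- B replaces A's single mutating pass (inner break-loop into a dict) by a pure per-category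
-- decomposition: a first_category helper and one filter per category; same cost, no mutation.

-- the keyword table (a module-level constant shared by both programs)
def kwCats : List (String × List String) := [
  ("vehicles", ["car", "vehicle", "truck", "bus", "suv", "sedan", "motorcycle", "bicycle"]),
  ("traffic_control", ["light", "signal", "sign", "traffic", "stop", "yield"]),
  ("pedestrians", ["person", "pedestrian", "people", "cyclist", "walker"]),
  ("road_elements", ["road", "street", "lane", "intersection", "crosswalk", "sidewalk", "highway", "curb"]),
  ("landmarks", ["building", "store", "shop", "fence", "house", "structure", "storefront"]),
  ("environment", ["tree", "sky", "cloud", "weather", "rain", "fog"]),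
  ("lighting", ["light", "lamp", "illumination", "glow", "headlight", "streetlight"])]

-- ===== PORT A =====
-- A's inner 'for category, keywords in …: if any(kw in noun …): append; assigned = True; break'
def pvInnerA (noun : String) : List (String × List String) → PySem.Dict String (List String) → PySem.Dict String (List String) × Bool
  | [], cd => (cd, false)
  | (category, keywords) :: rest, cd =>
    if keywords.any (fun kw => PySem.Str.isIn kw noun) then
      (cd.modify category [] (fun l => l ++ [noun]), true)
    else pvInnerA noun rest cd

def categorize_nouns (nouns : List String) : List (String × List String) :=
  let init : PySem.Dict String (List String) :=
    PySem.Dict.ofList (kwCats.map (fun p => (p.1, ([] : List String))))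
  let st := nouns.foldl
    (fun (st : PySem.Dict String (List String) × List String) noun =>
      let r := pvInnerA noun kwCats st.1
      if r.2 then (r.1, st.2) else (r.1, st.2 ++ [noun]))
    (init, [])
  (st.1.insert "other" (PySem.List.slice st.2 none (some 20))).items

-- ===== PORT B =====
-- B's first_category: first category (in table order) with a keyword occurring in noun
def pvFirstGo (noun : String) : List (String × List String) → Option String
  | [] => none
  | (category, keywords) :: rest =>
    if keywords.any (fun kw => PySem.Str.isIn kw noun) then some category
    else pvFirstGo noun rest

def first_category (noun : String) : Option String := pvFirstGo noun kwCats

def categorize_nouns_alt (nouns : List String) : List (String × List String) :=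
  let pairs := nouns.map (fun n => (n, first_category n))
  let result : PySem.Dict String (List String) :=
    PySem.Dict.ofList (kwCats.map (fun p =>
      (p.1, (pairs.filter (fun q => q.2 == some p.1)).map (fun q => q.1))))
  (result.insert "other"
    (PySem.List.slice ((pairs.filter (fun q => q.2 == none)).map (fun q => q.1)) none (some 20))).items

-- ===== PRECONDITION & SPEC =====
def Spec_categorize_nouns (nouns : List String) (out : List (String × List String)) : Prop := out = categorize_nouns_alt nouns
instance (nouns : List String) (out : List (String × List String)) : Decidable (Spec_categorize_nouns nouns out) := by unfold Spec_categorize_nouns; infer_instance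

-- ===== CLAIM (what is proved, stated in full; the proofs are below) =====
def Claim_equal_categorize_nouns : Prop := ∀ (nouns : List String), Dom_categorize_nouns nouns → Spec_categorize_nouns nouns (categorize_nouns nouns)

-- ===== LEMMAS AND PROOFS =====

-- the canonical dict after processing prefix `pre`
def canonD (pre : List String) : PySem.Dict String (List String) :=
  PySem.Dict.mk (kwCats.map (fun p =>
    (p.1, pre.filter (fun n => first_category n == some p.1))))

theorem pvInnerA_eq (noun : String) (cats : List (String × List String))
    (cd : PySem.Dict String (List String)) :
    pvInnerA noun cats cd =
      match pvFirstGo noun cats with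
      | some c => (cd.modify c [] (fun l => l ++ [noun]), true)
      | none => (cd, false) := by
  induction cats with
  | nil => rfl
  | cons p rest ih =>
    obtain ⟨c, kws⟩ := p
    simp only [pvInnerA, pvFirstGo]
    split_ifs with h
    · rfl
    · exact ih

theorem pvFirstGo_mem {noun c : String} : ∀ {cats : List (String × List String)},
    pvFirstGo noun cats = some c → c ∈ cats.map Prod.fst := by
  intro cats
  induction cats with
  | nil => intro h; simp [pvFirstGo] at h
  | cons p rest ih =>
    obtain ⟨c', kws⟩ := p
    simp only [pvFirstGo]
    split_ifs with h
    · intro hh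
      simp at hh
      simp [hh]
    · intro hh
      simp [ih hh]

theorem contains_mk_map (cats : List (String × List String)) (F : String → List String)
    (c : String) (hc : c ∈ cats.map Prod.fst) :
    (PySem.Dict.mk (cats.map (fun p => (p.1, F p.1)))).contains c = true := by
  rcases List.mem_map.mp hc with ⟨p, hp, rfl⟩
  exact List.any_eq_true.mpr ⟨(p.1, F p.1), List.mem_map.mpr ⟨p, hp, rfl⟩, by simp⟩

theorem getD_mk_map (cats : List (String × List String)) (F : String → List String)
    (c : String) (hc : c ∈ cats.map Prod.fst) :
    (PySem.Dict.mk (cats.map (fun p => (p.1, F p.1)))).getD c [] = F c := by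
  induction cats with
  | nil => simp at hc
  | cons p rest ih =>
    by_cases h : p.1 = c
    · simp [PySem.Dict.getD, PySem.Dict.get?, h]
    · have hc' : c ∈ rest.map Prod.fst := by
        rcases List.mem_map.mp hc with ⟨q, hq, he⟩
        rcases List.mem_cons.mp hq with rfl | hq'
        · exact absurd he h
        · exact List.mem_map.mpr ⟨q, hq', he⟩
      have hb : (p.1 == c) = false := by simp [h]
      simpa [PySem.Dict.getD, PySem.Dict.get?, hb] using ih hc'

theorem modify_mk_map (cats : List (String × List String)) (F : String → List String)
    (c : String) (v : List String) (hc : c ∈ cats.map Prod.fst) :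
    (PySem.Dict.mk (cats.map (fun p => (p.1, F p.1)))).modify c [] (fun l => l ++ v)
      = PySem.Dict.mk (cats.map (fun p => (p.1, F p.1 ++ if p.1 == c then v else []))) := by
  rw [PySem.Dict.modify, getD_mk_map cats F c hc, PySem.Dict.insert,
    if_pos (contains_mk_map cats F c hc)]
  apply PySem.Dict.ext
  simp only [List.map_map]
  apply List.map_congr_left
  intro p _
  by_cases h : p.1 = c
  · simp [h]
  · simp [h]

theorem ofList_mk_map (cats : List (String × List String)) (F : String → List String)
    (hnd : (cats.map Prod.fst).Nodup) :
    PySem.Dict.ofList (cats.map (fun p => (p.1, F p.1)))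
      = PySem.Dict.mk (cats.map (fun p => (p.1, F p.1))) := by
  apply PySem.Dict.ext
  rw [PySem.Dict.ofList, PySem.Dict.update]
  have h := PySem.Dict.items_foldl_insert_fresh (cats.map (fun p => (p.1, F p.1)))
    Prod.fst Prod.snd PySem.Dict.empty
    (by intro a _; exact PySem.Dict.contains_empty _)
    (by simpa [List.map_map] using hnd)
  simpa [PySem.Dict.empty] using h

theorem stepA_eq (pre : List String) (noun : String) :
    (if (pvInnerA noun kwCats (canonD pre)).2 = true
     then ((pvInnerA noun kwCats (canonD pre)).1, pre.filter (fun n => first_category n == none))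
     else ((pvInnerA noun kwCats (canonD pre)).1, pre.filter (fun n => first_category n == none) ++ [noun]))
    = (canonD (pre ++ [noun]), (pre ++ [noun]).filter (fun n => first_category n == none)) := by
  rw [pvInnerA_eq]
  cases hfc : pvFirstGo noun kwCats with
  | none =>
    rw [if_neg (by simp)]
    simp only [Prod.mk.injEq]
    constructor
    · rw [canonD, canonD]
      congr 1
      apply List.map_congr_left
      intro p _
      have : (first_category noun == some p.1) = false := by
        simp [first_category, hfc]
      simp [List.filter_append, this]
    · simp [List.filter_append, first_category, hfc]
  | some c =>
    rw [if_pos rfl]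
    simp only [Prod.mk.injEq]
    constructor
    · rw [canonD,
        modify_mk_map kwCats (fun k => pre.filter (fun n => first_category n == some k))
          c [noun] (pvFirstGo_mem hfc), canonD]
      congr 1
      apply List.map_congr_left
      intro p _
      have hfceq : first_category noun = some c := by simp [first_category, hfc]
      by_cases h : p.1 = c
      · simp [List.filter_append, hfceq, h]
      · have h1 : (p.1 == c) = false := by simp [h]
        have h2 : (first_category noun == some p.1) = false := by
          simp [hfceq]; exact fun he => h he.symm
        simp [List.filter_append, h1, h2]
    · simp [List.filter_append, first_category, hfc]

theorem foldA (l : List String) : ∀ (pre : List String),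
    l.foldl
      (fun (st : PySem.Dict String (List String) × List String) noun =>
        if (pvInnerA noun kwCats st.1).2 = true then ((pvInnerA noun kwCats st.1).1, st.2)
        else ((pvInnerA noun kwCats st.1).1, st.2 ++ [noun]))
      (canonD pre, pre.filter (fun n => first_category n == none))
    = (canonD (pre ++ l), (pre ++ l).filter (fun n => first_category n == none)) := by
  induction l with
  | nil => intro pre; simp
  | cons n l ih =>
    intro pre
    rw [List.foldl_cons]
    simp only [stepA_eq pre n]
    rw [ih (pre ++ [n])]
    simp

theorem pairs_filter_map (nouns : List String) (c : Option String) :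
    ((nouns.map (fun n => (n, first_category n))).filter (fun q => q.2 == c)).map (fun q => q.1)
      = nouns.filter (fun n => first_category n == c) := by
  induction nouns with
  | nil => rfl
  | cons n l ih =>
    by_cases h : (first_category n == c) = true <;> simp [h, ih]

theorem kw_nodup : (kwCats.map Prod.fst).Nodup := by decide

-- ===== VERDICT (by name: the statement is the Claim_ definition above) =====
theorem categorize_nouns_spec : Claim_equal_categorize_nouns := by
  intro nouns _
  simp only [Spec_categorize_nouns, categorize_nouns, categorize_nouns_alt]
  simp only [pairs_filter_map]
  have hinit : PySem.Dict.ofList (kwCats.map (fun p => (p.1, ([] : List String)))) = canonD [] := by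
    rw [ofList_mk_map kwCats (fun _ => []) kw_nodup]; rfl
  rw [hinit]
  have hfold := foldA nouns []
  simp only [List.filter_nil, List.nil_append] at hfold
  rw [hfold,
    ofList_mk_map kwCats (fun k => nouns.filter (fun n => first_category n == some k)) kw_nodup]
  rw [canonD]
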